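-- pv_equiv track=rewrite | github.com/CHAHBG/XamLeydiV2 | scripts/generate_prebuilt_db.py | canonicalize_properties
-- ===== SOURCE A (Python) =====
-- def canonicalize_properties(properties: dict) -> dict:
--     """Return a shallow copy of properties with some common variant keys
--     mapped to canonical names expected by the app UI.
--
--     Examples handled:
--       - Vocation_1 -> Vocation
--       - any key like type_usa / typeusage -> type_usag
--     """
--     if not properties:
--         return properties
--     props = dict(properties)  # shallow copy
--
--     # Canonicalize vocation-like keys
--     if not props.get('Vocation'):
--         for k, v in properties.items():
--             if k and isinstance(k, str) and k.lower().replace('_', '').startswith('vocation') and v: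
--                 props['Vocation'] = v
--                 break
--
--     # Canonicalize type usage keys -> 'type_usag'
--     if not props.get('type_usag'):
--         for k, v in properties.items():
--             if not k or not isinstance(k, str):
--                 continue
--             kl = k.lower().replace('_', '').replace(' ', '')
--             # common variants
--             if kl in ('typeusa', 'typeusage', 'typeusag', 'typeusag1', 'typeusa1', 'usage') and v:
--                 props['type_usag'] = v
--                 break
--
--     # Canonicalize village-like keys -> 'Village'
--     if not props.get('Village'):
--         for k, v in properties.items():
--             if not k or not isinstance(k, str) or not v:
--                 continue
--             kl = k.lower().strip()
--             # accept keys like 'village', 'village_name', 'village_sene', 'commune', 'commune_senegal', 'locality'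
--             if ('village' in kl or kl.startswith('village') or 'commune' in kl or 'localit' in kl or 'locality' in kl) and v:
--                 # prefer shorter names without trailing codes
--                 props['Village'] = v
--                 break
--
--     return props
-- ===== SOURCE B (Python) =====
-- def canonicalize_properties(properties: dict) -> dict:
--     """Single pass: collect the first match of each of the three categories,
--     then apply them (guarded) in the fixed canonical order."""
--     if not properties:
--         return properties
--     voc = usa = vil = None
--     for k, v in properties.items():
--         if not k or not isinstance(k, str) or not v:
--             continue
--         flat = k.lower().replace('_', '')
--         if voc is None and flat.startswith('vocation'):
--             voc = v
--         if usa is None and flat.replace(' ', '') in ('typeusa', 'typeusage', 'typeusag', 'typeusag1', 'typeusa1', 'usage'):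
--             usa = v
--         if vil is None:
--             kl = k.lower().strip()
--             if 'village' in kl or 'commune' in kl or 'localit' in kl:
--                 vil = v
--     props = dict(properties)
--     if voc is not None and not props.get('Vocation'):
--         props['Vocation'] = voc
--     if usa is not None and not props.get('type_usag'):
--         props['type_usag'] = usa
--     if vil is not None and not props.get('Village'):
--         props['Village'] = vil
--     return props
-- ===== Notes on version B (the rewrite author's own statement) =====
-- stated objective: alternative
-- what changed: Replaces A's three separate guarded scans of the items with one pass that collects the first match of each category into three options, followed by three guarded insertions in canonical order.
import Mathlib
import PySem

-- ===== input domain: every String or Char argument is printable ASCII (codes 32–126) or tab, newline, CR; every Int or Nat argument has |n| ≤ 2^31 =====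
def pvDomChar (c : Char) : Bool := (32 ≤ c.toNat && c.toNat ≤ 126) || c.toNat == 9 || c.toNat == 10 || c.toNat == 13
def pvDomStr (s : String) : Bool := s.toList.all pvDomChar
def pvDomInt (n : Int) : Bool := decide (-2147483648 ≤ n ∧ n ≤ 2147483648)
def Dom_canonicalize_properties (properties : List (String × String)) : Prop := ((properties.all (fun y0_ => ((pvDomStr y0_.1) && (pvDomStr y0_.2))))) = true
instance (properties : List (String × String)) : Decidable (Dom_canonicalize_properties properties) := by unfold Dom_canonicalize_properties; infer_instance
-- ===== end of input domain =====

-- B replaces A's three separate guarded scans with one pass collecting three first matches,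
-- then three guarded inserts in canonical order (objective: alternative decomposition).

-- ===== PORT A =====
-- predicate of A's vocation loop body: `k and isinstance(k, str) and k.lower().replace('_','').startswith('vocation') and v`
def pvPredVoc (k v : String) : Bool :=
  k ≠ "" && PySem.Str.startswith (PySem.Str.replace (PySem.Str.lower k) "_" "") "vocation" && v ≠ ""

-- predicate of A's type-usage loop body (after the `continue` guard)
def pvPredUsa (k v : String) : Bool :=
  k ≠ "" &&
    (let kl := PySem.Str.replace (PySem.Str.replace (PySem.Str.lower k) "_" "") " " ""
     kl == "typeusa" || kl == "typeusage" || kl == "typeusag" || kl == "typeusag1" || kl == "typeusa1" || kl == "usage") &&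
    v ≠ ""

-- predicate of A's village loop body (after the `continue` guard; the `and v` repeats the guard)
def pvPredVil (k v : String) : Bool :=
  k ≠ "" && v ≠ "" &&
    (let kl := PySem.Str.strip (PySem.Str.lower k)
     PySem.Str.isIn "village" kl || PySem.Str.startswith kl "village" || PySem.Str.isIn "commune" kl ||
       PySem.Str.isIn "localit" kl || PySem.Str.isIn "locality" kl) &&
    v ≠ ""

-- A's first `for … break` loop: insert on first match and stop
def pvScanVoc : List (String × String) → PySem.Dict String String → PySem.Dict String String
  | [], props => props
  | (k, v) :: rest, props =>
    if pvPredVoc k v then props.insert "Vocation" v else pvScanVoc rest props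

def pvScanUsa : List (String × String) → PySem.Dict String String → PySem.Dict String String
  | [], props => props
  | (k, v) :: rest, props =>
    if pvPredUsa k v then props.insert "type_usag" v else pvScanUsa rest props

def pvScanVil : List (String × String) → PySem.Dict String String → PySem.Dict String String
  | [], props => props
  | (k, v) :: rest, props =>
    if pvPredVil k v then props.insert "Village" v else pvScanVil rest props

def canonicalize_properties (properties : List (String × String)) : List (String × String) :=
  if properties = [] then properties
  else
    let props : PySem.Dict String String := PySem.Dict.mk properties  -- dict(properties)
    -- `not props.get('X')` ⇔ the value is missing or "" (string values): getD with default ""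
    let props := if props.getD "Vocation" "" = "" then pvScanVoc properties props else props
    let props := if props.getD "type_usag" "" = "" then pvScanUsa properties props else props
    let props := if props.getD "Village" "" = "" then pvScanVil properties props else props
    props.items

-- ===== PORT B =====
-- Source B's single-pass loop body: fill each still-None slot on its first match
def pvStep (st : Option String × Option String × Option String) (p : String × String) :
    Option String × Option String × Option String :=
  if p.1 = "" ∨ p.2 = "" then st
  else
    (if st.1.isNone && PySem.Str.startswith (PySem.Str.replace (PySem.Str.lower p.1) "_" "") "vocation"
       then some p.2 else st.1,
     if st.2.1.isNone &&
         (let fl := PySem.Str.replace (PySem.Str.replace (PySem.Str.lower p.1) "_" "") " " ""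
          fl == "typeusa" || fl == "typeusage" || fl == "typeusag" || fl == "typeusag1" || fl == "typeusa1" || fl == "usage")
       then some p.2 else st.2.1,
     if st.2.2.isNone &&
         (let kl := PySem.Str.strip (PySem.Str.lower p.1)
          PySem.Str.isIn "village" kl || PySem.Str.isIn "commune" kl || PySem.Str.isIn "localit" kl)
       then some p.2 else st.2.2)

def canonicalize_properties_alt (properties : List (String × String)) : List (String × String) :=
  if properties = [] then properties
  else
    let st := properties.foldl pvStep (none, none, none)
    let props : PySem.Dict String String := PySem.Dict.mk properties  -- dict(properties)
    let props := match st.1 with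
      | some v => if props.getD "Vocation" "" = "" then props.insert "Vocation" v else props
      | none => props
    let props := match st.2.1 with
      | some v => if props.getD "type_usag" "" = "" then props.insert "type_usag" v else props
      | none => props
    let props := match st.2.2 with
      | some v => if props.getD "Village" "" = "" then props.insert "Village" v else props
      | none => props
    props.items

-- ===== PRECONDITION & SPEC =====
def Spec_canonicalize_properties (properties : List (String × String)) (out : List (String × String)) : Prop := out = canonicalize_properties_alt properties
instance (properties : List (String × String)) (out : List (String × String)) : Decidable (Spec_canonicalize_properties properties out) := by unfold Spec_canonicalize_properties; infer_instance

-- ===== CLAIM (what is proved, stated in full; the proofs are below) =====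
def Claim_equal_canonicalize_properties : Prop := ∀ (properties : List (String × String)), Dom_canonicalize_properties properties → Spec_canonicalize_properties properties (canonicalize_properties properties)

-- ===== LEMMAS AND PROOFS =====

-- first matching value of each category, as a find?
def pvFirst (p : String → String → Bool) (l : List (String × String)) : Option String :=
  (l.find? (fun q => p q.1 q.2)).map Prod.snd

-- option "keep if already set"
def pvOr (a b : Option String) : Option String := match a with | some x => some x | none => b

theorem pvOr_none (b : Option String) : pvOr none b = b := rfl

theorem pvOr_assoc (a x y : Option String) : pvOr (pvOr a x) y = pvOr a (pvOr x y) := by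
  cases a <;> rfl

theorem pvFirst_cons (p : String → String → Bool) (k v : String) (l : List (String × String)) :
    pvFirst p ((k, v) :: l) = pvOr (if p k v = true then some v else none) (pvFirst p l) := by
  by_cases h : p k v = true <;> simp [pvFirst, List.find?, h, pvOr]

-- a startswith implies substring membership
theorem pvSW (kl sub : List Char) (h : PySem.Chars.startswith kl sub = true) :
    PySem.Chars.isIn sub kl = true :=
  (PySem.Chars.isIn_iff_infix sub kl).2 ((PySem.Chars.startswith_iff kl sub).1 h).isInfix

-- a substring of a substring is a substring
theorem pvPfx (s t kl : List Char) (hp : s <+: t) (h : PySem.Chars.isIn t kl = true) :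
    PySem.Chars.isIn s kl = true :=
  (PySem.Chars.isIn_iff_infix s kl).2 (List.IsInfix.trans hp.isInfix ((PySem.Chars.isIn_iff_infix t kl).1 h))

-- A's five-way village test equals B's three-way one (startswith and 'locality' are redundant)
theorem pvVil_eq (k v : String) (hk : ¬k = "") (hv : ¬v = "") :
    pvPredVil k v =
      (let kl := PySem.Str.strip (PySem.Str.lower k)
       PySem.Str.isIn "village" kl || PySem.Str.isIn "commune" kl || PySem.Str.isIn "localit" kl) := by
  rw [Bool.eq_iff_iff]
  simp only [pvPredVil, hk, hv, ne_eq, not_false_eq_true, decide_true, Bool.true_and, Bool.and_true,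
    Bool.or_eq_true, PySem.Str.isIn, PySem.Str.startswith, PySem.Str.strip, PySem.Str.lower]
  constructor
  · rintro ((((h | h) | h) | h) | h)
    · exact Or.inl (Or.inl h)
    · exact Or.inl (Or.inl (pvSW _ _ h))
    · exact Or.inl (Or.inr h)
    · exact Or.inr h
    · exact Or.inr (pvPfx _ _ _ (by decide) h)
  · rintro ((h | h) | h)
    · exact Or.inl (Or.inl (Or.inl (Or.inl h)))
    · exact Or.inl (Or.inl (Or.inr h))
    · exact Or.inl (Or.inr h)

-- the fused pass computes the three first matches
theorem pvFold_eq (l : List (String × String)) (a b c : Option String) :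
    l.foldl pvStep (a, b, c) =
      (pvOr a (pvFirst pvPredVoc l), pvOr b (pvFirst pvPredUsa l), pvOr c (pvFirst pvPredVil l)) := by
  induction l generalizing a b c with
  | nil => cases a <;> cases b <;> cases c <;> rfl
  | cons p rest ih =>
    obtain ⟨k, v⟩ := p
    rw [List.foldl_cons]
    by_cases hkv : k = "" ∨ v = ""
    · have hstep : pvStep (a, b, c) (k, v) = (a, b, c) := by
        simp only [pvStep]; rw [if_pos hkv]
      have hv0 : pvPredVoc k v = false := by
        rcases hkv with h | h <;> simp [pvPredVoc, h]
      have hu0 : pvPredUsa k v = false := by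
        rcases hkv with h | h <;> simp [pvPredUsa, h]
      have hw0 : pvPredVil k v = false := by
        rcases hkv with h | h <;> simp [pvPredVil, h]
      rw [hstep, ih]
      simp [pvFirst_cons, hv0, hu0, hw0, pvOr_none]
    · push Not at hkv
      obtain ⟨hk, hv⟩ := hkv
      have hstep : pvStep (a, b, c) (k, v) =
          (pvOr a (if pvPredVoc k v = true then some v else none),
           pvOr b (if pvPredUsa k v = true then some v else none),
           pvOr c (if pvPredVil k v = true then some v else none)) := by
        simp only [pvStep]
        rw [if_neg (by simp [hk, hv])]
        refine Prod.ext ?_ (Prod.ext ?_ ?_)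
        · cases a <;> simp [pvOr, pvPredVoc, hk, hv]
        · cases b <;> simp [pvOr, pvPredUsa, hk, hv]
        · cases c <;> simp [pvOr, pvVil_eq k v hk hv]
      rw [hstep, ih]
      simp only [pvFirst_cons, ← pvOr_assoc]

-- each of A's break-loops is "insert the first match, if any"
theorem pvScanVoc_eq (l : List (String × String)) (props : PySem.Dict String String) :
    pvScanVoc l props = match pvFirst pvPredVoc l with
      | some v => props.insert "Vocation" v | none => props := by
  induction l with
  | nil => rfl
  | cons p rest ih =>
    obtain ⟨k, v⟩ := p
    by_cases h : pvPredVoc k v = true <;> simp [pvScanVoc, pvFirst, List.find?, h, ih]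

theorem pvScanUsa_eq (l : List (String × String)) (props : PySem.Dict String String) :
    pvScanUsa l props = match pvFirst pvPredUsa l with
      | some v => props.insert "type_usag" v | none => props := by
  induction l with
  | nil => rfl
  | cons p rest ih =>
    obtain ⟨k, v⟩ := p
    by_cases h : pvPredUsa k v = true <;> simp [pvScanUsa, pvFirst, List.find?, h, ih]

theorem pvScanVil_eq (l : List (String × String)) (props : PySem.Dict String String) :
    pvScanVil l props = match pvFirst pvPredVil l with
      | some v => props.insert "Village" v | none => props := by
  induction l with
  | nil => rfl
  | cons p rest ih =>
    obtain ⟨k, v⟩ := p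
    by_cases h : pvPredVil k v = true <;> simp [pvScanVil, pvFirst, List.find?, h, ih]

-- a guarded break-loop stage equals B's option-driven stage
theorem pvStage_eq (key : String) (o : Option String) (props : PySem.Dict String String) :
    (if props.getD key "" = "" then
       (match o with | some v => props.insert key v | none => props)
     else props) =
    (match o with
     | some v => if props.getD key "" = "" then props.insert key v else props
     | none => props) := by
  cases o <;> split_ifs <;> rfl

-- ===== VERDICT (by name: the statement is the Claim_ definition above) =====
theorem canonicalize_properties_spec : Claim_equal_canonicalize_properties := by
  intro properties _
  unfold Spec_canonicalize_properties canonicalize_properties canonicalize_properties_alt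
  by_cases hne : properties = []
  · simp [hne]
  · simp only [hne, if_false]
    rw [pvFold_eq]
    simp only [pvOr_none]
    rw [pvScanVoc_eq, pvScanUsa_eq, pvScanVil_eq, pvStage_eq, pvStage_eq, pvStage_eq]
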